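-- pv_equiv track=rewrite | github.com/SEunNGHYun/YSH_Algorithm | 프로그래머스/unrated/120808. 분수의 덧셈/분수의 덧셈.py | solution
-- ===== SOURCE A (Python) =====
-- def solution(numer1, denom1, numer2, denom2):
--     answer = []
--     def check (n1, n2):
--         a, b , c, = 0,0,0
--         if (n1 > n2):  # a가 큰수 b는 작은 수로 고정
--             a = n1
--             b = n2
--         else:
--             a = n2
--             b = n1
--
--         while (b != 0):
--             c = a % b
--             a = b
--             b = c
--
--         return a
--         # a가 최대 공약수
--
--     mom = (denom1 * denom2) // check(denom1, denom2)
--     bro = (numer1 * (mom//denom1)) + (numer2 * (mom//denom2))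
--     d = check(bro, mom)
--     answer = [bro // d, mom // d]
--
--     return answer
-- ===== SOURCE B (Python) =====
-- def solution(numer1, denom1, numer2, denom2):
--     # recursive Euclid; caller passes the larger argument first, like A's helper
--     def gcd(a, b):
--         return a if b == 0 else gcd(b, a % b)
--     g = gcd(denom1, denom2) if denom1 > denom2 else gcd(denom2, denom1)
--     num = (numer1 * denom2 + numer2 * denom1) // g
--     den = (denom1 * denom2) // g
--     d = gcd(num, den) if num > den else gcd(den, num)
--     return [num // d, den // d]
-- ===== Notes on version B (the rewrite author's own statement) =====
-- stated objective: simpler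
-- what changed: B drops A's LCM computation and per-term numerator scaling: it cross-multiplies once (n1*d2+n2*d1 over d1*d2), divides both by gcd(d1,d2), and reduces, with a recursive gcd instead of A's while loop.
import Mathlib
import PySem

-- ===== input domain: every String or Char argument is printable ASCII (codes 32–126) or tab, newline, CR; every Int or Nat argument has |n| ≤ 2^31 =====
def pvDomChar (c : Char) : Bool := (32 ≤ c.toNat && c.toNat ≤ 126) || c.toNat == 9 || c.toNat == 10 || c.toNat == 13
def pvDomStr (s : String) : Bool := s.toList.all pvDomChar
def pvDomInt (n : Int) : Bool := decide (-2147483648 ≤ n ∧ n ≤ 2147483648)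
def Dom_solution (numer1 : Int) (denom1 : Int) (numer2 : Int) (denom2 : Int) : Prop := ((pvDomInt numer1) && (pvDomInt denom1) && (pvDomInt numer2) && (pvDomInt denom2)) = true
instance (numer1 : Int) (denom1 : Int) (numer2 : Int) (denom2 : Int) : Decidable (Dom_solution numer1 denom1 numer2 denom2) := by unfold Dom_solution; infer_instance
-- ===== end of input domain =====

-- B replaces A's LCM-and-scale-each-term pipeline by one cross-multiplication followed by
-- dividing both parts by gcd(denom1, denom2), with a recursive gcd (objective: simpler).

-- termination measure for the Euclid loops (Python '%' takes the divisor's sign)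
theorem pyMod_natAbs_lt (a b : Int) (hb : b ≠ 0) :
    (PySem.Int.mod a b).natAbs < b.natAbs := by
  rcases lt_or_gt_of_ne hb with h | h
  · have := PySem.Int.mod_neg_bounds a h
    omega
  · have h1 := PySem.Int.mod_nonneg a h
    have h2 := PySem.Int.mod_lt a h
    omega

-- ===== PORT A =====
-- A's inner 'check': the while loop (state (a, b) -> (b, a % b))
def solutionCheckLoop (a b : Int) : Int :=
  if h : b = 0 then a else solutionCheckLoop b (PySem.Int.mod a b)
termination_by b.natAbs
decreasing_by exact pyMod_natAbs_lt a b h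

-- A's 'check(n1, n2)': put the larger argument first, then run the loop
def solutionCheck (n1 n2 : Int) : Int :=
  if n1 > n2 then solutionCheckLoop n1 n2 else solutionCheckLoop n2 n1

def solution (numer1 : Int) (denom1 : Int) (numer2 : Int) (denom2 : Int) : List Int :=
  let mom := PySem.Int.floordiv (denom1 * denom2) (solutionCheck denom1 denom2)
  let bro := numer1 * (PySem.Int.floordiv mom denom1) + numer2 * (PySem.Int.floordiv mom denom2)
  let d := solutionCheck bro mom
  [PySem.Int.floordiv bro d, PySem.Int.floordiv mom d]

-- ===== PORT B =====
-- B's recursive gcd (tail call in Source B)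
def pyGcd (a b : Int) : Int :=
  if h : b = 0 then a else pyGcd b (PySem.Int.mod a b)
termination_by b.natAbs
decreasing_by exact pyMod_natAbs_lt a b h

def solution_alt (numer1 : Int) (denom1 : Int) (numer2 : Int) (denom2 : Int) : List Int :=
  let g := if denom1 > denom2 then pyGcd denom1 denom2 else pyGcd denom2 denom1
  let num := PySem.Int.floordiv (numer1 * denom2 + numer2 * denom1) g
  let den := PySem.Int.floordiv (denom1 * denom2) g
  let d := if num > den then pyGcd num den else pyGcd den num
  [PySem.Int.floordiv num d, PySem.Int.floordiv den d]

-- ===== PRECONDITION & SPEC =====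
-- A raises ZeroDivisionError exactly when a denominator is 0; those inputs are excluded.
def Pre_solution (numer1 : Int) (denom1 : Int) (numer2 : Int) (denom2 : Int) : Prop :=
  denom1 ≠ 0 ∧ denom2 ≠ 0
instance (numer1 : Int) (denom1 : Int) (numer2 : Int) (denom2 : Int) : Decidable (Pre_solution numer1 denom1 numer2 denom2) := by unfold Pre_solution; infer_instance

def pvWitness_solution : Int × Int × Int × Int := (1, 2, 3, 4)

def Spec_solution (numer1 : Int) (denom1 : Int) (numer2 : Int) (denom2 : Int) (out : List Int) : Prop := out = solution_alt numer1 denom1 numer2 denom2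
instance (numer1 : Int) (denom1 : Int) (numer2 : Int) (denom2 : Int) (out : List Int) : Decidable (Spec_solution numer1 denom1 numer2 denom2 out) := by unfold Spec_solution; infer_instance

-- ===== CLAIM (what is proved, stated in full; the proofs are below) =====
def Claim_equal_solution : Prop := ∀ (numer1 : Int) (denom1 : Int) (numer2 : Int) (denom2 : Int), Dom_solution numer1 denom1 numer2 denom2 → Pre_solution numer1 denom1 numer2 denom2 → Spec_solution numer1 denom1 numer2 denom2 (solution numer1 denom1 numer2 denom2)

-- ===== LEMMAS AND PROOFS =====

theorem checkLoop_eq_pyGcd (a b : Int) : solutionCheckLoop a b = pyGcd a b := by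
  induction a, b using solutionCheckLoop.induct with
  | case1 a => rw [solutionCheckLoop, pyGcd, dif_pos rfl, dif_pos rfl]
  | case2 a b h ih => rw [solutionCheckLoop, pyGcd, dif_neg h, dif_neg h, ih]

theorem pyGcd_dvd (a b : Int) : pyGcd a b ∣ a ∧ pyGcd a b ∣ b := by
  induction a, b using pyGcd.induct with
  | case1 a => rw [pyGcd]; simp
  | case2 a b h ih =>
    rw [pyGcd, dif_neg h]
    refine ⟨?_, ih.1⟩
    have hx : pyGcd b (PySem.Int.mod a b) ∣ PySem.Int.floordiv a b * b + PySem.Int.mod a b :=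
      dvd_add (Dvd.dvd.mul_left ih.1 _) ih.2
    rwa [PySem.Int.floordiv_mul_add_mod] at hx

theorem pyGcd_ne_zero (a b : Int) (h : a ≠ 0 ∨ b ≠ 0) : pyGcd a b ≠ 0 := by
  induction a, b using pyGcd.induct with
  | case1 a => rw [pyGcd]; simpa using h
  | case2 a b hb ih => rw [pyGcd, dif_neg hb]; exact ih (Or.inl hb)

theorem check_dvd (a b : Int) : solutionCheck a b ∣ a ∧ solutionCheck a b ∣ b := by
  unfold solutionCheck
  split <;> rw [checkLoop_eq_pyGcd]
  · exact pyGcd_dvd a b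
  · exact ⟨(pyGcd_dvd b a).2, (pyGcd_dvd b a).1⟩

theorem check_ne_zero (a b : Int) (h : a ≠ 0 ∨ b ≠ 0) : solutionCheck a b ≠ 0 := by
  unfold solutionCheck
  split <;> rw [checkLoop_eq_pyGcd]
  · exact pyGcd_ne_zero a b h
  · exact pyGcd_ne_zero b a h.symm

theorem floordiv_mul_cancel (g x : Int) (hg : g ≠ 0) : PySem.Int.floordiv (g * x) g = x := by
  have h : PySem.Int.floordiv (g * x) g = Int.fdiv (g * x) g := rfl
  rw [h, Int.mul_fdiv_cancel_left _ hg]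

-- the cross-multiplied numerator divided by g equals A's scaled-and-summed numerator
theorem cross_eq (n1 n2 g k1 k2 : Int) (hg : g ≠ 0) (hk1 : k1 ≠ 0) (hk2 : k2 ≠ 0) :
    PySem.Int.floordiv (n1 * (g * k2) + n2 * (g * k1)) g
      = n1 * PySem.Int.floordiv (PySem.Int.floordiv ((g * k1) * (g * k2)) g) (g * k1)
        + n2 * PySem.Int.floordiv (PySem.Int.floordiv ((g * k1) * (g * k2)) g) (g * k2) := by
  have hgk1 : g * k1 ≠ 0 := mul_ne_zero hg hk1
  have hgk2 : g * k2 ≠ 0 := mul_ne_zero hg hk2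
  rw [show (g * k1) * (g * k2) = g * ((g * k1) * k2) by ring, floordiv_mul_cancel _ _ hg,
      floordiv_mul_cancel _ _ hgk1,
      show (g * k1) * k2 = (g * k2) * k1 by ring, floordiv_mul_cancel _ _ hgk2,
      show n1 * (g * k2) + n2 * (g * k1) = g * (n1 * k2 + n2 * k1) by ring,
      floordiv_mul_cancel _ _ hg]

-- ===== VERDICT (by name: the statement is the Claim_ definition above) =====
theorem solution_spec : Claim_equal_solution := by
  intro n1 d1 n2 d2 _ hpre
  obtain ⟨hd1, hd2⟩ := hpre
  have hgfun : ∀ x y : Int, (if x > y then pyGcd x y else pyGcd y x) = solutionCheck x y := by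
    intro x y; unfold solutionCheck; split <;> rw [checkLoop_eq_pyGcd]
  simp only [Spec_solution, solution, solution_alt, hgfun]
  obtain ⟨k1, hk1⟩ := (check_dvd d1 d2).1
  obtain ⟨k2, hk2⟩ := (check_dvd d1 d2).2
  have hgne : solutionCheck d1 d2 ≠ 0 := check_ne_zero d1 d2 (Or.inl hd1)
  have hk1ne : k1 ≠ 0 := fun h0 => hd1 (by rw [hk1, h0, mul_zero])
  have hk2ne : k2 ≠ 0 := fun h0 => hd2 (by rw [hk2, h0, mul_zero])
  have key := cross_eq n1 n2 (solutionCheck d1 d2) k1 k2 hgne hk1ne hk2ne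
  rw [← hk1, ← hk2] at key
  rw [key]
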